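-- pv_equiv track=rewrite | github.com/MullerLi/KlarMin | tools/merge_bizud_tw_glyphs.py | new_glyph_name
-- ===== SOURCE A (Python) =====
-- def new_glyph_name(codepoint: int, glyph_order: list[str]) -> str:
--     base = f"uni{codepoint:04X}" if codepoint <= 0xFFFF else f"u{codepoint:05X}"
--     if base not in glyph_order:
--         return base
--     suffix = 1
--     while f"{base}.{suffix}" in glyph_order:
--         suffix += 1
--     return f"{base}.{suffix}"
-- ===== SOURCE B (Python) =====
-- def new_glyph_name(codepoint: int, glyph_order: list[str]) -> str:
--     base = f"uni{codepoint:04X}" if codepoint <= 0xFFFF else f"u{codepoint:05X}"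
--     prefix = base + "."
--     used = set()            # numeric suffixes already taken
--     base_present = False
--     for name in glyph_order:
--         if name == base:
--             base_present = True
--         elif name.startswith(prefix):
--             tail = name[len(prefix):]
--             # only canonical decimals occupy a suffix (no sign, no leading zero)
--             if tail.isdigit() and not tail.startswith("0"):
--                 n = 0
--                 for ch in tail:
--                     n = 10 * n + (ord(ch) - 48)
--                 used.add(n)
--     if not base_present:
--         return base
--     # first gap in the strictly increasing sorted suffix list
--     n = 1
--     for s in sorted(used):
--         if s == n:
--             n += 1
--         elif s > n:
--             break
--     return f"{prefix}{n}"
-- ===== Notes on version B (the rewrite author's own statement) =====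
-- stated objective: alternative
-- what changed: A probes base, base.1, base.2, ... with one full membership scan of glyph_order per candidate; B never probes: a single pass parses each canonical 'base.<n>' name into an integer suffix set (and a base-presence flag), and the answer is the first gap found by one linear scan of the sorted suffix set.
import Mathlib
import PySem

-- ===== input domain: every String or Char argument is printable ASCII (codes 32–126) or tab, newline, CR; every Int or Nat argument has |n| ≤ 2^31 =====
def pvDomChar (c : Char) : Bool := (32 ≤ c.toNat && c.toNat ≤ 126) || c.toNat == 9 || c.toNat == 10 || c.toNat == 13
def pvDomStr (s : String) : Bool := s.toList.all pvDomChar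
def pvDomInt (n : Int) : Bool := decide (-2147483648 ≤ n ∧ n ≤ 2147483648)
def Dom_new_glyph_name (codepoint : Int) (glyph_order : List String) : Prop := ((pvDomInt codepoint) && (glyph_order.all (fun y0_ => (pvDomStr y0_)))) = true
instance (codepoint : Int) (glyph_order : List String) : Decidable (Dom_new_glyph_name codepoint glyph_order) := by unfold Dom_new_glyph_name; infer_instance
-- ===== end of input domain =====

set_option maxHeartbeats 1000000
set_option maxRecDepth 8000

-- B never probes candidate names against glyph_order: one pass parses each canonical
-- "base.<n>" name into an integer suffix set (plus a base-presence flag), and the answer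
-- is the first gap of a single scan over the sorted suffixes (alternative algorithm).

-- ===== PORT A =====

-- shared formatting helper: f"{n:0<w>X}" (uppercase hex, zero-padded, sign in front) — exact via Chars.zfill
def pvHexPad (n : Int) (w : Int) : String :=
  let ds := (Nat.toDigits 16 n.natAbs).map Char.toUpper
  String.ofList (PySem.Chars.zfill (if n < 0 then '-' :: ds else ds) w)

-- base = f"uni{codepoint:04X}" if codepoint <= 0xFFFF else f"u{codepoint:05X}"  (same line in A and B)
def pvBase (codepoint : Int) : String :=
  if codepoint ≤ 0xFFFF then "uni" ++ pvHexPad codepoint 4 else "u" ++ pvHexPad codepoint 5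

-- A's while loop: probe f"{base}.{suffix}" against glyph_order, suffix += 1.
-- fuel = glyph_order.length + 1 never runs out (length+1 distinct probes cannot all be members).
def pvALoop (base : String) (glyph_order : List String) : Nat → Int → String
  | 0, suffix => base ++ "." ++ PySem.Int.toStr suffix
  | fuel + 1, suffix =>
    if base ++ "." ++ PySem.Int.toStr suffix ∈ glyph_order then
      pvALoop base glyph_order fuel (suffix + 1)
    else
      base ++ "." ++ PySem.Int.toStr suffix

def new_glyph_name (codepoint : Int) (glyph_order : List String) : String :=
  let base := pvBase codepoint
  if base ∉ glyph_order then base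
  else pvALoop base glyph_order (glyph_order.length + 1) 1

-- ===== PORT B =====

-- n = 0; for ch in tail: n = 10 * n + (ord(ch) - 48)
def pvParseDigits (cs : List Char) : Int :=
  cs.foldl (fun a c => 10 * a + ((c.toNat : Int) - 48)) 0

-- loop body of B's single pass: base-presence flag, and parse canonical 'prefix<digits>' names
def pvBStep (base pfx : String) (acc : PySem.Set Int × Bool) (name : String) : PySem.Set Int × Bool :=
  if name == base then (acc.1, true)
  else if PySem.Str.startswith name pfx then
    let tail := PySem.Str.slice name (some (PySem.Str.len pfx)) none
    if PySem.Str.strIsdigit tail && !(PySem.Str.startswith tail "0") then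
      (PySem.Set.add acc.1 (pvParseDigits tail.toList), acc.2)
    else acc
  else acc

-- for s in sorted(used): if s == n: n += 1 elif s > n: break
def pvScan : List Int → Int → Int
  | [], n => n
  | s :: rest, n => if s = n then pvScan rest (n + 1) else if n < s then n else pvScan rest n

def new_glyph_name_alt (codepoint : Int) (glyph_order : List String) : String :=
  let base := pvBase codepoint
  let pfx := base ++ "."
  let acc := glyph_order.foldl (pvBStep base pfx) (PySem.Set.empty, false)
  if !acc.2 then base
  else pfx ++ PySem.Int.toStr (pvScan (PySem.List.sorted acc.1 (fun x => x) false) 1)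

-- ===== PRECONDITION & SPEC =====
def Spec_new_glyph_name (codepoint : Int) (glyph_order : List String) (out : String) : Prop := out = new_glyph_name_alt codepoint glyph_order
instance (codepoint : Int) (glyph_order : List String) (out : String) : Decidable (Spec_new_glyph_name codepoint glyph_order out) := by unfold Spec_new_glyph_name; infer_instance

-- ===== CLAIM (what is proved, stated in full; the proofs are below) =====
def Claim_equal_new_glyph_name : Prop := ∀ (codepoint : Int) (glyph_order : List String), Dom_new_glyph_name codepoint glyph_order → Spec_new_glyph_name codepoint glyph_order (new_glyph_name codepoint glyph_order)

-- ===== LEMMAS AND PROOFS =====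

-- ---- decimal strings: Nat.toDigits 10 as a clean structural recursion ----

def pvNatChars (n : Nat) : List Char :=
  if _h : n < 10 then [Nat.digitChar n]
  else pvNatChars (n / 10) ++ [Nat.digitChar (n % 10)]
  decreasing_by exact Nat.div_lt_self (by omega) (by omega)

theorem pv_tdc_acc (f : Nat) : ∀ (n : Nat) (acc : List Char),
    Nat.toDigitsCore 10 f n acc = Nat.toDigitsCore 10 f n [] ++ acc := by
  induction f with
  | zero => intro n acc; simp [Nat.toDigitsCore]
  | succ f ih =>
    intro n acc
    simp only [Nat.toDigitsCore]
    by_cases h : n / 10 = 0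
    · simp [h]
    · simp only [h, if_false]
      rw [ih (n / 10) ((n % 10).digitChar :: acc), ih (n / 10) [(n % 10).digitChar]]
      simp

theorem pv_tdc_eq_natChars (f : Nat) : ∀ n : Nat, n < f →
    Nat.toDigitsCore 10 f n [] = pvNatChars n := by
  induction f with
  | zero => intro n h; omega
  | succ f ih =>
    intro n hn
    simp only [Nat.toDigitsCore]
    by_cases h : n / 10 = 0
    · have h10 : n < 10 := by omega
      rw [h, if_pos rfl, pvNatChars, dif_pos h10, Nat.mod_eq_of_lt h10]
    · have h10 : ¬ n < 10 := by omega
      simp only [h, if_false]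
      rw [pv_tdc_acc, ih (n / 10) (by omega)]
      conv_rhs => rw [pvNatChars]
      rw [dif_neg h10]

theorem pv_toChars_nonneg (k : Int) (hk : 0 ≤ k) :
    PySem.Int.toChars k = pvNatChars k.toNat := by
  unfold PySem.Int.toChars
  rw [if_neg (by omega)]
  exact pv_tdc_eq_natChars (k.toNat + 1) k.toNat (by omega)

theorem pv_digitChar_toNat (m : Nat) (h : m < 10) : (Nat.digitChar m).toNat = m + 48 := by
  interval_cases m <;> decide

-- Nat-valued digit parse, and its agreement with the Int-valued port parse
def pvParseNat (cs : List Char) : Nat :=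
  cs.foldl (fun a c => 10 * a + (c.toNat - 48)) 0

theorem pv_char_toNat_inj (a b : Char) (h : a.toNat = b.toNat) : a = b := by
  apply Char.ext
  exact UInt32.toNat_inj.mp h

theorem pv_isdigit_bounds (c : Char) (h : PySem.Chars.isdigit c = true) :
    48 ≤ c.toNat ∧ c.toNat ≤ 57 := by
  simp only [PySem.Chars.isdigit, Bool.and_eq_true, decide_eq_true_eq] at h
  obtain ⟨h1, h2⟩ := h
  rw [Char.le_def, UInt32.le_iff_toNat_le] at h1 h2
  have e1 : ('0'.val).toNat = 48 := by decide
  have e2 : ('9'.val).toNat = 57 := by decide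
  rw [e1] at h1
  rw [e2] at h2
  exact ⟨h1, h2⟩

theorem pv_parse_cast (cs : List Char) (hd : ∀ c ∈ cs, PySem.Chars.isdigit c = true) :
    pvParseDigits cs = (pvParseNat cs : Int) := by
  unfold pvParseDigits pvParseNat
  suffices h : ∀ a : Nat, cs.foldl (fun a c => 10 * a + ((c.toNat : Int) - 48)) (a : Int)
      = ((cs.foldl (fun a c => 10 * a + (c.toNat - 48)) a : Nat) : Int) by
    have h0 := h 0
    norm_num at h0
    exact h0
  induction cs with
  | nil => intro a; simp
  | cons c rest ih =>
    intro a
    have hc : PySem.Chars.isdigit c = true := hd c (by simp)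
    have h48 : 48 ≤ c.toNat := (pv_isdigit_bounds c hc).1
    have hrest : ∀ x ∈ rest, PySem.Chars.isdigit x = true := fun x hx => hd x (by simp [hx])
    simp only [List.foldl_cons]
    rw [show (10 * (a : Int) + ((c.toNat : Int) - 48)) = ((10 * a + (c.toNat - 48) : Nat) : Int) by
      push_cast [Nat.cast_sub h48]; ring]
    exact (ih hrest) _

theorem pv_isdigit_digitChar (m : Nat) (h : m < 10) :
    PySem.Chars.isdigit (Nat.digitChar m) = true := by
  interval_cases m <;> decide

theorem pv_parse_natChars (n : Nat) : pvParseNat (pvNatChars n) = n := by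
  induction n using Nat.strong_induction_on with
  | _ n ih =>
    rw [pvNatChars]
    by_cases h : n < 10
    · rw [dif_pos h]
      simp [pvParseNat, pv_digitChar_toNat n h]
    · rw [dif_neg h]
      unfold pvParseNat
      rw [List.foldl_append]
      have := ih (n / 10) (Nat.div_lt_self (by omega) (by omega))
      unfold pvParseNat at this
      rw [this]
      simp only [List.foldl_cons, List.foldl_nil]
      rw [pv_digitChar_toNat (n % 10) (by omega)]
      omega

theorem pv_natChars_digits (n : Nat) : ∀ c ∈ pvNatChars n, PySem.Chars.isdigit c = true := by
  induction n using Nat.strong_induction_on with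
  | _ n ih =>
    rw [pvNatChars]
    by_cases h : n < 10
    · rw [dif_pos h]
      intro c hc
      simp only [List.mem_singleton] at hc
      subst hc
      exact pv_isdigit_digitChar n h
    · rw [dif_neg h]
      intro c hc
      rcases List.mem_append.mp hc with h1 | h1
      · exact ih (n / 10) (Nat.div_lt_self (by omega) (by omega)) c h1
      · simp only [List.mem_singleton] at h1
        subst h1
        exact pv_isdigit_digitChar (n % 10) (by omega)

theorem pv_natChars_ne_nil (n : Nat) : pvNatChars n ≠ [] := by
  rw [pvNatChars]
  by_cases h : n < 10
  · simp [h]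
  · simp [h]

theorem pv_natChars_head (n : Nat) : 1 ≤ n → (pvNatChars n).head? ≠ some '0' := by
  induction n using Nat.strong_induction_on with
  | _ n ih =>
    intro hn
    rw [pvNatChars]
    by_cases h : n < 10
    · rw [dif_pos h]
      interval_cases n <;> decide
    · rw [dif_neg h]
      rw [List.head?_append]
      rcases List.exists_cons_of_ne_nil (pv_natChars_ne_nil (n / 10)) with ⟨d, t, hdt⟩
      have := ih (n / 10) (Nat.div_lt_self (by omega) (by omega)) (by omega)
      rw [hdt] at this ⊢
      simpa using this

-- every canonical digit string (nonempty, digits, no leading '0') is pvNatChars of its value ≥ 1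
theorem pv_canon_eq_natChars (cs : List Char) :
    cs ≠ [] → (∀ c ∈ cs, PySem.Chars.isdigit c = true) → cs.head? ≠ some '0' →
    pvNatChars (pvParseNat cs) = cs ∧ 1 ≤ pvParseNat cs := by
  induction cs using List.reverseRecOn with
  | nil => intro h; exact absurd rfl h
  | append_singleton ds c ih =>
    intro _ hd hh
    have hc : PySem.Chars.isdigit c = true := hd c (by simp)
    have hcb : 48 ≤ c.toNat ∧ c.toNat ≤ 57 := pv_isdigit_bounds c hc
    have hdigitChar : Nat.digitChar (c.toNat - 48) = c := by
      have h1 : (Nat.digitChar (c.toNat - 48)).toNat = c.toNat := by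
        have h2 : c.toNat - 48 < 10 := by omega
        rw [pv_digitChar_toNat _ h2]; omega
      exact pv_char_toNat_inj _ _ h1
    rcases eq_or_ne ds [] with rfl | hds
    · simp only [List.nil_append] at hh ⊢
      have hne0 : c ≠ '0' := by intro h; apply hh; simp [h]
      have hv1 : 1 ≤ c.toNat - 48 := by
        by_cases h : c.toNat = 48
        · exact absurd (pv_char_toNat_inj c '0' (by rw [h]; decide)) hne0
        · omega
      have hp : pvParseNat [c] = c.toNat - 48 := by simp [pvParseNat]
      refine ⟨?_, by omega⟩
      rw [hp, pvNatChars, dif_pos (by omega), hdigitChar]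
    · have hdd : ∀ x ∈ ds, PySem.Chars.isdigit x = true := by
        intro x hx; exact hd x (by simp [hx])
      have hhh : ds.head? ≠ some '0' := by
        rcases List.exists_cons_of_ne_nil hds with ⟨d, t, rfl⟩
        simpa using hh
      obtain ⟨hds_eq, hds_ge⟩ := ih hds hdd hhh
      have hsplit : pvParseNat (ds ++ [c]) = 10 * pvParseNat ds + (c.toNat - 48) := by
        unfold pvParseNat
        rw [List.foldl_append]; simp
      refine ⟨?_, by omega⟩
      rw [hsplit, pvNatChars, dif_neg (by omega)]
      have hq : (10 * pvParseNat ds + (c.toNat - 48)) / 10 = pvParseNat ds := by omega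
      have hm : (10 * pvParseNat ds + (c.toNat - 48)) % 10 = c.toNat - 48 := by omega
      rw [hq, hm, hds_eq, hdigitChar]

-- ---- strings: slicing, prefixes, and the probe string pfx ++ str(k) ----

theorem pvAccept_iff (base : String) (name t : String) :
    (name ≠ base ∧ PySem.Str.startswith name (base ++ ".") = true ∧
      PySem.Str.slice name (some (PySem.Str.len (base ++ "."))) none = t) ↔
    name = (base ++ ".") ++ t := by
  have hlen0 : PySem.Str.len (base ++ ".") = ((base ++ ".").toList.length : Int) := by
    rw [PySem.Str.len_eq]
  have hlen : (0 : Int) ≤ PySem.Str.len (base ++ ".") := by rw [hlen0]; positivity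
  have hl : (PySem.Str.len (base ++ ".")).toNat = (base ++ ".").toList.length := by
    rw [hlen0]; exact Int.toNat_natCast _
  constructor
  · rintro ⟨hne, hs, ht⟩
    rw [PySem.Str.startswith_eq, PySem.Chars.startswith_iff] at hs
    obtain ⟨r, hr⟩ := hs
    have ht' := congrArg String.toList ht
    rw [PySem.Str.toList_slice, PySem.Chars.slice_eq_listSlice,
      PySem.List.slice_from _ hlen, hl, ← hr, List.drop_left] at ht'
    have hsplit : ((base ++ ".") ++ t).toList = (base ++ ".").toList ++ t.toList :=
      String.toList_append
    rw [← String.toList_inj, hsplit, ← ht', hr]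
  · rintro rfl
    refine ⟨?_, ?_, ?_⟩
    · intro h
      have := congrArg (fun s => s.toList.length) h
      simp [String.toList_append] at this
    · rw [PySem.Str.startswith_eq, PySem.Chars.startswith_iff]
      exact ⟨t.toList, (String.toList_append).symm⟩
    · have hsplit : ((base ++ ".") ++ t).toList = (base ++ ".").toList ++ t.toList :=
        String.toList_append
      rw [← String.toList_inj, PySem.Str.toList_slice, PySem.Chars.slice_eq_listSlice,
        PySem.List.slice_from _ hlen, hl, hsplit, List.drop_left]

theorem pv_startswith_zero_iff (t : String) :
    PySem.Str.startswith t "0" = true ↔ t.toList.head? = some '0' := by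
  rw [PySem.Str.startswith_eq, PySem.Chars.startswith_iff]
  show ("0" : String).toList <+: t.toList ↔ _
  have : ("0" : String).toList = ['0'] := rfl
  rw [this]
  cases t.toList with
  | nil => simp
  | cons d l =>
    constructor
    · rintro ⟨r, hr⟩
      simp only [List.singleton_append, List.cons.injEq] at hr
      simp [← hr.1]
    · intro h
      simp only [List.head?_cons, Option.some.injEq] at h
      exact ⟨l, by simp [h]⟩

-- the canonical test of B's pass holds for a string t iff t.toList is a canonical digit string
theorem pv_canonTest_iff (t : String) :
    (PySem.Str.strIsdigit t && !(PySem.Str.startswith t "0")) = true ↔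
      (t.toList ≠ [] ∧ (∀ c ∈ t.toList, PySem.Chars.isdigit c = true) ∧
       t.toList.head? ≠ some '0') := by
  rw [Bool.and_eq_true, Bool.not_eq_true', ← Bool.not_eq_true]
  rw [PySem.Str.strIsdigit_eq]
  unfold PySem.Chars.strIsdigit
  rw [Bool.and_eq_true]
  constructor
  · rintro ⟨⟨h1, h2⟩, h3⟩
    refine ⟨by simpa using h1, by simpa using h2, ?_⟩
    rw [pv_startswith_zero_iff] at h3
    intro hc; exact h3 hc
  · rintro ⟨h1, h2, h3⟩
    refine ⟨⟨by simpa using h1, by simpa using h2⟩, ?_⟩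
    rw [pv_startswith_zero_iff]
    intro hc; exact h3 hc

-- str(k) for k ≥ 1 is the canonical digit string pvNatChars k.toNat
theorem pv_toStr_toList (k : Int) (hk : 0 ≤ k) :
    (PySem.Int.toStr k).toList = pvNatChars k.toNat := by
  unfold PySem.Int.toStr
  rw [String.toList_ofList]
  exact pv_toChars_nonneg k hk

-- ---- characterising B's single pass ----

-- the flag component of B's fold records exactly whether base occurs
theorem pvFold_snd (base pfx : String) (go : List String) (p : PySem.Set Int × Bool) :
    (go.foldl (pvBStep base pfx) p).2 = (p.2 || decide (base ∈ go)) := by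
  induction go generalizing p with
  | nil => simp
  | cons name rest ih =>
    simp only [List.foldl_cons, ih, List.mem_cons]
    unfold pvBStep
    by_cases h : name = base
    · subst h; simp
    · simp only [beq_iff_eq, h, if_false]
      split_ifs <;> simp [Ne.symm h]

-- the set component of B's fold stays duplicate-free
theorem pvFold_fst_nodup (base pfx : String) (go : List String) (p : PySem.Set Int × Bool)
    (hp : p.1.Nodup) : (go.foldl (pvBStep base pfx) p).1.Nodup := by
  induction go generalizing p with
  | nil => exact hp
  | cons name rest ih =>
    simp only [List.foldl_cons]
    apply ih
    simp only [pvBStep]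
    split_ifs <;> first | exact hp | exact PySem.Set.nodup_add _ _ hp

-- membership in the set component of B's fold
theorem pvFold_fst_mem (base pfx : String) (go : List String) (p : PySem.Set Int × Bool)
    (k : Int) :
    k ∈ (go.foldl (pvBStep base pfx) p).1 ↔
      k ∈ p.1 ∨ ∃ name ∈ go, name ≠ base ∧ PySem.Str.startswith name pfx = true ∧
        (PySem.Str.strIsdigit (PySem.Str.slice name (some (PySem.Str.len pfx)) none) &&
          !(PySem.Str.startswith (PySem.Str.slice name (some (PySem.Str.len pfx)) none) "0")) = true ∧
        pvParseDigits (PySem.Str.slice name (some (PySem.Str.len pfx)) none).toList = k := by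
  induction go generalizing p with
  | nil => simp
  | cons name rest ih =>
    simp only [List.foldl_cons, ih, List.mem_cons]
    unfold pvBStep
    by_cases h : name = base
    · subst h
      simp only [beq_self_eq_true, if_true]
      constructor
      · rintro (hm | ⟨m, hm, hne, hs, hc, ht⟩)
        · exact Or.inl hm
        · exact Or.inr ⟨m, Or.inr hm, hne, hs, hc, ht⟩
      · rintro (hm | ⟨m, (rfl | hm), hne, hs, hc, ht⟩)
        · exact Or.inl hm
        · exact absurd rfl hne
        · exact Or.inr ⟨m, hm, hne, hs, hc, ht⟩
    · simp only [beq_iff_eq, h, if_false]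
      by_cases hs : PySem.Str.startswith name pfx = true
      · simp only [hs, if_true]
        by_cases hc : (PySem.Str.strIsdigit (PySem.Str.slice name (some (PySem.Str.len pfx)) none) &&
            !(PySem.Str.startswith (PySem.Str.slice name (some (PySem.Str.len pfx)) none) "0")) = true
        · simp only [hc, if_true, PySem.Set.mem_add]
          constructor
          · rintro ((hm | rfl) | ⟨m, hm, hne, hst, hcc, ht⟩)
            · exact Or.inl hm
            · exact Or.inr ⟨name, Or.inl rfl, h, hs, hc, rfl⟩
            · exact Or.inr ⟨m, Or.inr hm, hne, hst, hcc, ht⟩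
          · rintro (hm | ⟨m, (rfl | hm), hne, hst, hcc, ht⟩)
            · exact Or.inl (Or.inl hm)
            · exact Or.inl (Or.inr ht.symm)
            · exact Or.inr ⟨m, hm, hne, hst, hcc, ht⟩
        · simp only [hc]
          constructor
          · rintro (hm | ⟨m, hm, hne, hst, hcc, ht⟩)
            · exact Or.inl hm
            · exact Or.inr ⟨m, Or.inr hm, hne, hst, hcc, ht⟩
          · rintro (hm | ⟨m, (rfl | hm), hne, hst, hcc, ht⟩)
            · exact Or.inl hm
            · exact absurd hcc hc
            · exact Or.inr ⟨m, hm, hne, hst, hcc, ht⟩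
      · simp only [hs]
        constructor
        · rintro (hm | ⟨m, hm, hne, hst, hcc, ht⟩)
          · exact Or.inl hm
          · exact Or.inr ⟨m, Or.inr hm, hne, hst, hcc, ht⟩
        · rintro (hm | ⟨m, (rfl | hm), hne, hst, hcc, ht⟩)
          · exact Or.inl hm
          · exact absurd hst hs
          · exact Or.inr ⟨m, hm, hne, hst, hcc, ht⟩

-- THE BRIDGE: for k ≥ 1, the probe string (base ++ ".") ++ str(k) is in glyph_order
-- iff k is in the suffix set collected by B's pass
theorem pvBridge (base : String) (go : List String) (k : Int) (hk : 1 ≤ k) :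
    ((base ++ ".") ++ PySem.Int.toStr k ∈ go) ↔
      k ∈ (go.foldl (pvBStep base (base ++ ".")) (PySem.Set.empty, false)).1 := by
  rw [pvFold_fst_mem]
  simp only [PySem.Set.empty]
  constructor
  · intro hm
    refine Or.inr ⟨(base ++ ".") ++ PySem.Int.toStr k, hm, ?_⟩
    have hdec := (pvAccept_iff base ((base ++ ".") ++ PySem.Int.toStr k) (PySem.Int.toStr k)).mpr rfl
    obtain ⟨hne, hsw, hsl⟩ := hdec
    refine ⟨hne, hsw, ?_, ?_⟩
    · rw [hsl, pv_canonTest_iff, pv_toStr_toList k (by omega)]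
      refine ⟨pv_natChars_ne_nil _, pv_natChars_digits _, pv_natChars_head _ (by omega)⟩
    · rw [hsl, pv_toStr_toList k (by omega),
        pv_parse_cast _ (pv_natChars_digits _), pv_parse_natChars]
      omega
  · rintro (hm | ⟨name, hmem, hne, hsw, hcc, hpv⟩)
    · simp at hm
    · -- name = (base ++ ".") ++ t with t canonical parsing to k, so t = str(k)
      set t := PySem.Str.slice name (some (PySem.Str.len (base ++ "."))) none with ht
      have hname : name = (base ++ ".") ++ t :=
        (pvAccept_iff base name t).mp ⟨hne, hsw, rfl⟩
      rw [pv_canonTest_iff] at hcc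
      obtain ⟨h1, h2, h3⟩ := hcc
      obtain ⟨heq, hge⟩ := pv_canon_eq_natChars t.toList h1 h2 h3
      have hcast : pvParseDigits t.toList = (pvParseNat t.toList : Int) := pv_parse_cast _ h2
      have hkval : k = (pvParseNat t.toList : Int) := by rw [← hcast, hpv]
      have htk : t = PySem.Int.toStr k := by
        rw [← String.toList_inj, pv_toStr_toList k (by omega), hkval]
        rw [Int.toNat_natCast, heq]
      rw [htk] at hname
      rw [← hname]
      exact hmem

-- ---- the gap scan over a strictly increasing list finds the least absent value ----

theorem pvScan_spec (l : List Int) (hl : l.Pairwise (· < ·)) :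
    ∀ n : Int, n ≤ pvScan l n ∧ pvScan l n ∉ l ∧
      ∀ k, n ≤ k → k < pvScan l n → k ∈ l := by
  induction l with
  | nil =>
    intro n
    refine ⟨by simp [pvScan], by simp [pvScan], ?_⟩
    intro k h1 h2
    simp only [pvScan] at h2
    omega
  | cons s rest ih =>
    intro n
    rw [List.pairwise_cons] at hl
    obtain ⟨hs, hrest⟩ := hl
    unfold pvScan
    by_cases h1 : s = n
    · subst h1
      rw [if_pos rfl]
      obtain ⟨ha, hb, hc⟩ := ih hrest (s + 1)
      refine ⟨by omega, ?_, ?_⟩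
      · simp only [List.mem_cons, not_or]
        exact ⟨by omega, hb⟩
      · intro k hk1 hk2
        rcases eq_or_lt_of_le hk1 with rfl | hk3
        · simp
        · simp only [List.mem_cons]
          exact Or.inr (hc k (by omega) hk2)
    · rw [if_neg h1]
      by_cases h2 : n < s
      · rw [if_pos h2]
        refine ⟨le_refl n, ?_, ?_⟩
        · simp only [List.mem_cons, not_or]
          refine ⟨by omega, fun hm => ?_⟩
          have := hs n hm; omega
        · intro k hk1 hk2; omega
      · rw [if_neg h2]
        obtain ⟨ha, hb, hc⟩ := ih hrest n
        refine ⟨ha, ?_, ?_⟩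
        · simp only [List.mem_cons, not_or]
          exact ⟨by omega, hb⟩
        · intro k hk1 hk2
          simp only [List.mem_cons]
          exact Or.inr (hc k hk1 hk2)

-- ---- characterising A's probe loop via the least free suffix ----

-- the probe strings are pairwise distinct
theorem pvProbe_inj (base : String) : Function.Injective
    (fun j : Nat => (base ++ ".") ++ PySem.Int.toStr ((j : Int) + 1)) := by
  intro a b hab
  simp only at hab
  have h1 := congrArg String.toList hab
  simp only [String.toList_append] at h1
  rw [List.append_assoc, List.append_assoc] at h1
  have h2 := List.append_cancel_left (List.append_cancel_left h1)
  rw [pv_toStr_toList _ (by omega), pv_toStr_toList _ (by omega)] at h2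
  have h3 := congrArg pvParseNat h2
  rw [pv_parse_natChars, pv_parse_natChars] at h3
  omega

-- some suffix among 1 .. length+1 is free (length+1 distinct strings cannot all be members)
theorem pvExists_free (base : String) (go : List String) :
    ∃ j : Nat, j ≤ go.length ∧ (base ++ ".") ++ PySem.Int.toStr ((j : Int) + 1) ∉ go := by
  by_contra hc
  simp only [not_exists, not_and, not_not] at hc
  have hsub : ((List.range (go.length + 1)).map
      (fun j : Nat => (base ++ ".") ++ PySem.Int.toStr ((j : Int) + 1))) ⊆ go := by
    intro x hx
    rw [List.mem_map] at hx
    obtain ⟨j, hj, rfl⟩ := hx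
    rw [List.mem_range] at hj
    exact hc j (by omega)
  have hnd : ((List.range (go.length + 1)).map
      (fun j : Nat => (base ++ ".") ++ PySem.Int.toStr ((j : Int) + 1))).Nodup :=
    List.nodup_range.map (pvProbe_inj base)
  have := (hnd.subperm hsub).length_le
  simp only [List.length_map, List.length_range] at this
  omega

-- A's loop lands exactly on suffix m+1, the least free one
theorem pvALoop_eq (base : String) (go : List String) (m : Nat)
    (hm_free : (base ++ ".") ++ PySem.Int.toStr ((m : Int) + 1) ∉ go)
    (hm_min : ∀ i : Nat, i < m → (base ++ ".") ++ PySem.Int.toStr ((i : Int) + 1) ∈ go) :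
    ∀ (fuel i : Nat), i ≤ m → m - i < fuel →
      pvALoop base go fuel ((i : Int) + 1) = base ++ "." ++ PySem.Int.toStr ((m : Int) + 1) := by
  intro fuel
  induction fuel with
  | zero => intro i h1 h2; omega
  | succ f ih =>
    intro i h1 h2
    unfold pvALoop
    rcases eq_or_lt_of_le h1 with rfl | hlt
    · rw [if_neg hm_free]
    · rw [if_pos (hm_min i hlt)]
      have : ((i : Int) + 1) + 1 = ((i + 1 : Nat) : Int) + 1 := by push_cast; ring
      rw [this]
      exact ih (i + 1) (by omega) (by omega)

-- ===== VERDICT (by name: the statement is the Claim_ definition above) =====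
theorem new_glyph_name_spec : Claim_equal_new_glyph_name := by
  intro codepoint glyph_order _
  unfold Spec_new_glyph_name new_glyph_name new_glyph_name_alt
  set base := pvBase codepoint with hbase
  have hsnd := pvFold_snd base (base ++ ".") glyph_order (PySem.Set.empty, false)
  by_cases hmem : base ∈ glyph_order
  · simp only [hmem, not_true, if_false]
    rw [hsnd]
    simp only [hmem, decide_true, Bool.false_or, Bool.not_true, Bool.false_eq_true, if_false]
    -- the least free suffix
    obtain ⟨j0, hj0, hj0free⟩ := pvExists_free base glyph_order
    have hex : ∃ j : Nat, (base ++ ".") ++ PySem.Int.toStr ((j : Int) + 1) ∉ glyph_order :=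
      ⟨j0, hj0free⟩
    classical
    set m := Nat.find hex with hm
    have hm_free : (base ++ ".") ++ PySem.Int.toStr ((m : Int) + 1) ∉ glyph_order :=
      Nat.find_spec hex
    have hm_min : ∀ i : Nat, i < m →
        (base ++ ".") ++ PySem.Int.toStr ((i : Int) + 1) ∈ glyph_order := by
      intro i hi
      have := Nat.find_min hex hi
      simpa using this
    have hm_le : m ≤ glyph_order.length := le_trans (Nat.find_le hj0free) hj0
    -- A's side
    have hA : pvALoop base glyph_order (glyph_order.length + 1) 1
        = base ++ "." ++ PySem.Int.toStr ((m : Int) + 1) := by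
      have := pvALoop_eq base glyph_order m hm_free hm_min (glyph_order.length + 1) 0
        (by omega) (by omega)
      simpa using this
    rw [hA]
    -- B's side: the sorted suffix list
    set S := (glyph_order.foldl (pvBStep base (base ++ ".")) (PySem.Set.empty, false)).1 with hS
    set l := PySem.List.sorted S (fun x => x) false with hldef
    have hnd : S.Nodup := pvFold_fst_nodup base (base ++ ".") glyph_order _ (by simp [PySem.Set.empty])
    have hndl : l.Nodup := ((PySem.List.sorted_perm S (fun x => x) false).nodup_iff).mpr hnd
    have hple : l.Pairwise (fun a b => a ≤ b) := by
      have := PySem.List.sorted_pairwise S (fun x => x)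
      simpa [hldef] using this
    have hplt : l.Pairwise (· < ·) := by
      have := List.Pairwise.and hple hndl
      exact this.imp (fun {a b} h => lt_of_le_of_ne h.1 h.2)
    have hmeml : ∀ x : Int, x ∈ l ↔ x ∈ S := fun x =>
      PySem.List.mem_sorted S (fun x => x) false x
    obtain ⟨hr1, hr2, hr3⟩ := pvScan_spec l hplt 1
    set r := pvScan l 1 with hrdef
    -- r = m + 1
    have hreq : r = (m : Int) + 1 := by
      by_contra hne
      rcases lt_or_gt_of_ne hne with hlt | hgt
      · -- r ≤ m, so r = i+1 with i < m; probe i+1 ∈ go → r ∈ S → r ∈ l, contradiction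
        have hi : ∃ i : Nat, r = (i : Int) + 1 ∧ i < m := ⟨(r - 1).toNat, by omega, by omega⟩
        obtain ⟨i, hri, him⟩ := hi
        have := hm_min i him
        rw [pvBridge base glyph_order ((i : Int) + 1) (by omega)] at this
        rw [hri] at hr2
        exact hr2 ((hmeml _).mpr this)
      · -- m + 1 < r, so m+1 ∈ l → m+1 ∈ S → probe m+1 ∈ go, contradiction
        have := hr3 ((m : Int) + 1) (by omega) hgt
        rw [hmeml] at this
        rw [← pvBridge base glyph_order ((m : Int) + 1) (by omega)] at this
        exact hm_free this
    rw [hreq]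
  · simp only [hmem, not_false_iff, if_true]
    rw [hsnd]
    simp [hmem]
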